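-- pv_equiv track=rewrite | github.com/slalit360/scalar_practice | DSA_ADV/Array/max_sum_pos_sub_array.py | max_sum_pos_subarray
-- ===== SOURCE A (Python) =====
-- import math
--
-- def max_sum_pos_subarray(A):
--     # TC : O(n)
--     n = len(A)
--     maxx = -math.inf
--     l = 0
--     s, e = -1, -1
--
--     for i in range(n):
--         if A[i] >= 0:
--
--             for j in range(i, n):
--                 if A[j] >= 0:
--
--                     tmp = sum(A[i:j + 1])
--                     if tmp > maxx:
--                         maxx = tmp
--                         s = i
--                         e = j
--                     if tmp == maxx and j - i + 1 >= l:
--                         maxx = tmp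
--                         s = i
--                         e = j
--                         l = e - s + 1
--                 else:
--                     break
--     if s == -1 and e == -1:
--         return []
--     return A[s:e + 1]
-- ===== SOURCE B (Python) =====
-- def max_sum_pos_subarray(A):
--     # Single pass over the maximal runs of consecutive non-negative elements:
--     # keep the run with the largest sum; on an equal sum, the later run wins
--     # when it is at least as long as the current record length.
--     best_run, best_sum, record_len = [], None, 0
--     run, run_sum = [], 0
--     for x in A:
--         if x >= 0:
--             run.append(x)
--             run_sum += x
--         else:
--             if run:
--                 best_run, best_sum, record_len = challenge(best_run, best_sum, record_len, run, run_sum)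
--             run, run_sum = [], 0
--     if run:
--         best_run, best_sum, record_len = challenge(best_run, best_sum, record_len, run, run_sum)
--     return best_run
--
-- def challenge(best_run, best_sum, record_len, run, run_sum):
--     if best_sum is None or run_sum > best_sum:
--         best_run, best_sum = run, run_sum
--     if run_sum == best_sum and len(run) >= record_len:
--         best_run, record_len = run, len(run)
--     return best_run, best_sum, record_len
-- ===== Notes on version B (the rewrite author's own statement) =====
-- stated objective: faster
-- what changed: Replaces the triple-nested all-windows scan (every start/end pair with a fresh sum()) by a single pass that accumulates each maximal non-negative run once and compares runs by (sum, then length-record tie-break).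
-- intended difference: When the final winning run strictly beats the previous maximum but is shorter than the record length and ends in zero(s), A returns that run with its trailing zeros stripped (its stale length record blocks the tie update), e.g. [1,1,1,-1,5,0] -> [5]; B returns the full run [5,0], the intended longest window of maximal sum. — e.g. on max_sum_pos_subarray([1, 1, 1, -1, 5, 0]): A returns [5], B returns [5, 0]
import Mathlib
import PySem

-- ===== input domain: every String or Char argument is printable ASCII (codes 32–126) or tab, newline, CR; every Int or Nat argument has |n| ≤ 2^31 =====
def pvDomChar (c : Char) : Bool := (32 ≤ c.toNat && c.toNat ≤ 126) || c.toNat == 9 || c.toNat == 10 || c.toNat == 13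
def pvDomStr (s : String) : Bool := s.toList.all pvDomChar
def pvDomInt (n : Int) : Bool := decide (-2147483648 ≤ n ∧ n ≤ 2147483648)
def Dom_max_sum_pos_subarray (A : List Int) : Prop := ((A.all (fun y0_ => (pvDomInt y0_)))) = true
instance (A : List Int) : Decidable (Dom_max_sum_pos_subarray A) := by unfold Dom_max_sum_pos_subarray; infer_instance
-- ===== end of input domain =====

-- B replaces A's O(n^3) all-windows scan by one pass over the maximal non-negative runs (objective: faster).

-- ===== PORT A =====
-- A's loop state: maxx (none = -math.inf), l, s, e
structure StA where
  m : Option Int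
  l : Int
  s : Int
  e : Int
deriving DecidableEq, Repr

-- 'tmp > maxx' with maxx possibly -inf
def gtM : Option Int → Int → Bool
  | none, _ => true
  | some c, t => decide (c < t)

-- 'tmp == maxx' with maxx possibly -inf
def eqM : Option Int → Int → Bool
  | none, _ => false
  | some c, t => decide (t = c)

-- the inner 'for j in range(i, n)' loop with its break
def innerA (Arr : List Int) (i : Int) : StA → List Int → StA
  | σ, [] => σ
  | σ, j :: js =>
    if 0 ≤ PySem.List.pyGetD Arr j 0 then
      let tmp := (PySem.List.slice Arr (some i) (some (j + 1))).sum
      let σ1 := if gtM σ.m tmp then ⟨some tmp, σ.l, i, j⟩ else σ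
      let σ2 := if eqM σ1.m tmp && decide (σ1.l ≤ j - i + 1) then ⟨some tmp, j - i + 1, i, j⟩ else σ1
      innerA Arr i σ2 js
    else σ

def max_sum_pos_subarray (A : List Int) : List Int :=
  let n : Int := A.length
  let σ := (PySem.List.pyRange 0 n 1).foldl
    (fun σ i => if 0 ≤ PySem.List.pyGetD A i 0 then innerA A i σ (PySem.List.pyRange i n 1) else σ)
    ⟨none, 0, -1, -1⟩
  if σ.s = -1 ∧ σ.e = -1 then [] else PySem.List.slice A (some σ.s) (some (σ.e + 1))

-- ===== PORT B =====
-- B's best-so-far record: best_run, best_sum (none = not yet set), record_len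
structure StB where
  bestRun : List Int
  bestSum : Option Int
  recordLen : Int
deriving DecidableEq, Repr

-- Source B's challenge(best_run, best_sum, record_len, run, run_sum)
def challenge (bestRun : List Int) (bestSum : Option Int) (recordLen : Int)
    (run : List Int) (runSum : Int) : List Int × Option Int × Int :=
  let p := if gtM bestSum runSum then (run, some runSum) else (bestRun, bestSum)
  if eqM p.2 runSum && decide (recordLen ≤ (run.length : Int)) then
    (run, p.2, (run.length : Int))
  else (p.1, p.2, recordLen)

def stepB (st : StB × List Int × Int) (x : Int) : StB × List Int × Int :=
  if 0 ≤ x then (st.1, st.2.1 ++ [x], st.2.2 + x)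
  else if st.2.1 ≠ [] then
    let c := challenge st.1.bestRun st.1.bestSum st.1.recordLen st.2.1 st.2.2
    (⟨c.1, c.2.1, c.2.2⟩, [], 0)
  else (st.1, [], 0)

def max_sum_pos_subarray_alt (A : List Int) : List Int :=
  let st := A.foldl stepB (⟨[], none, 0⟩, [], 0)
  let b := if st.2.1 ≠ [] then
      let c := challenge st.1.bestRun st.1.bestSum st.1.recordLen st.2.1 st.2.2
      (⟨c.1, c.2.1, c.2.2⟩ : StB)
    else st.1
  b.bestRun

-- ===== PRECONDITION & SPEC =====
-- record dynamics over the sign-homogeneous groups of the input: (best sum so far (-1 = none,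
-- run sums are never negative), record length, does the stale record trim the winner's zeros?)
def pvDStep (st : Int × Int × Bool) (v : List Int) : Int × Int × Bool :=
  if v.headI < 0 ∨ v.sum < st.1 ∨ (v.sum = st.1 ∧ (v.length : Int) < st.2.1) then st
  else (v.sum, max st.2.1 (v.length : Int),
    decide (st.1 < v.sum ∧ (v.length : Int) < st.2.1) && (v.getLast? == some 0))

-- On inputs where the final winning run strictly beats the previous maximum sum but is
-- shorter than the record length and ends in zero(s), A returns that run with its trailing
-- zeros stripped (its stale length record blocks the tie update); B returns the full run,
-- the intended longest window of maximal sum.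
def D_max_sum_pos_subarray (A : List Int) : Prop :=
  ((A.splitBy (fun a b => decide (0 ≤ a) == decide (0 ≤ b))).foldl
    pvDStep (-1, 0, false)).2.2 = true
instance (A : List Int) : Decidable (D_max_sum_pos_subarray A) := by
  unfold D_max_sum_pos_subarray; infer_instance

def Spec_max_sum_pos_subarray (A : List Int) (out : List Int) : Prop :=
  ¬ D_max_sum_pos_subarray A → out = max_sum_pos_subarray_alt A
instance (A : List Int) (out : List Int) : Decidable (Spec_max_sum_pos_subarray A out) := by
  unfold Spec_max_sum_pos_subarray; infer_instance

def pvDiffWitness_max_sum_pos_subarray : List Int := [1, 1, 1, -1, 5, 0]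
def pvDiffWitnessOut_max_sum_pos_subarray : (List Int) × (List Int) := ([5], [5, 0])

-- ===== CLAIM (what is proved, stated in full; the proofs are below) =====
def Claim_unchanged_max_sum_pos_subarray : Prop := ∀ (A : List Int), Dom_max_sum_pos_subarray A → Spec_max_sum_pos_subarray A (max_sum_pos_subarray A)
def Claim_changed_max_sum_pos_subarray : Prop := Dom_max_sum_pos_subarray (pvDiffWitness_max_sum_pos_subarray) ∧ D_max_sum_pos_subarray (pvDiffWitness_max_sum_pos_subarray) ∧ max_sum_pos_subarray (pvDiffWitness_max_sum_pos_subarray) = pvDiffWitnessOut_max_sum_pos_subarray.1 ∧ max_sum_pos_subarray_alt (pvDiffWitness_max_sum_pos_subarray) = pvDiffWitnessOut_max_sum_pos_subarray.2 ∧ pvDiffWitnessOut_max_sum_pos_subarray.1 ≠ pvDiffWitnessOut_max_sum_pos_subarray.2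
def Claim_exact_max_sum_pos_subarray : Prop := ∀ (A : List Int), Dom_max_sum_pos_subarray A → D_max_sum_pos_subarray A → max_sum_pos_subarray A ≠ max_sum_pos_subarray_alt A

-- ===== LEMMAS AND PROOFS =====

-- proof-side machinery: the maximal non-negative runs and the reference record dynamics
def pvPos (x : Int) : Bool := decide (0 ≤ x)

def pvRunsGo (r : List Int) : List Int → List (List Int)
  | [] => if r = [] then [] else [r]
  | x :: u =>
    if 0 ≤ x then pvRunsGo (r ++ [x]) u
    else if r = [] then pvRunsGo [] u else r :: pvRunsGo [] u

def pvRuns (v : List Int) : List (List Int) := pvRunsGo [] v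

-- reference record dynamics over the runs (Option-state twin of pvDStep)
def pvDRef (st : Option Int × Int × Bool) (v : List Int) : Option Int × Int × Bool :=
  let S := v.sum
  let L : Int := v.length
  if gtM st.1 S then
    if st.2.1 ≤ L then (some S, L, false)
    else (some S, st.2.1, v.getLast? == some 0)
  else if eqM st.1 S && decide (st.2.1 ≤ L) then (st.1, L, false)
  else st


-- length (1-based) of the first prefix of v whose running sum, started at t, reaches T
def firstHit (t T : Int) : List Int → Int
  | [] => 0
  | x :: u => if t + x = T then 1 else 1 + firstHit (t + x) T u

-- closed form of A's inner scan (start k, already c elements consumed with running sum t)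
def specScan (k c t : Int) (σ : StA) (v : List Int) : StA :=
  if v = [] then σ
  else
    let T := t + v.sum
    let L : Int := v.length
    match σ.m with
    | some M =>
      if T < M then σ
      else if σ.l ≤ c + L then ⟨some T, c + L, k, k + c + L - 1⟩
      else if T = M then σ
      else ⟨some T, σ.l, k, k + c + firstHit t T v - 1⟩
    | none =>
      if σ.l ≤ c + L then ⟨some T, c + L, k, k + c + L - 1⟩
      else ⟨some T, σ.l, k, k + c + firstHit t T v - 1⟩

-- A's inner scan, on the run elements themselves (j = absolute index, t = running sum)
def scan1 (k : Int) (σ : StA) (j t : Int) : List Int → StA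
  | [] => σ
  | x :: u =>
    let tmp := t + x
    let σ1 := if gtM σ.m tmp then ⟨some tmp, σ.l, k, j⟩ else σ
    let σ2 := if eqM σ1.m tmp && decide (σ1.l ≤ j - k + 1) then ⟨some tmp, j - k + 1, k, j⟩ else σ1
    scan1 k σ2 (j + 1) tmp u

-- all the scans whose start lies inside one run (one scan per start position)
def runA (k : Int) (σ : StA) : List Int → StA
  | [] => σ
  | x :: u => runA (k + 1) (scan1 k σ k 0 (x :: u)) u

-- A's outer loop, elementwise over the remaining list (i = absolute index)
def outerSim (Arr : List Int) : Int → List Int → StA → StA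
  | _, [], σ => σ
  | i, x :: u, σ =>
    outerSim Arr (i + 1) u
      (if 0 ≤ x then scan1 i σ i 0 ((x :: u).takeWhile pvPos) else σ)

-- run-level A: one specScan ("challenge") per maximal non-negative run
def chalA (k : Int) (σ : StA) (v : List Int) : StA := specScan k 0 0 σ v

def foldRunsA (Arr : List Int) : Int → List Int → StA → StA
  | _, [], σ => σ
  | i, x :: u, σ =>
    if 0 ≤ x then
      foldRunsA Arr (i + 1 + (u.takeWhile pvPos).length) (u.dropWhile pvPos)
        (chalA i σ (x :: u.takeWhile pvPos))
    else foldRunsA Arr (i + 1) u σ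
termination_by _ w => w.length
decreasing_by
  · simpa using Nat.lt_succ_of_le (u.length_dropWhile_le pvPos)
  · simp

-- B's challenge at the run level
def chalB (b : StB) (v : List Int) : StB :=
  let c := challenge b.bestRun b.bestSum b.recordLen v v.sum
  ⟨c.1, c.2.1, c.2.2⟩

-- the coupling invariant between A's state, B's state and the D-fold state at position i
def pvInv (Arr : List Int) (i : Int) (σ : StA) (b : StB) (d : Option Int × Int × Bool) : Prop :=
  σ.m = b.bestSum ∧ σ.m = d.1 ∧ σ.l = b.recordLen ∧ σ.l = d.2.1 ∧
  (σ.m = none → σ.l = 0 ∧ σ.s = -1 ∧ σ.e = -1 ∧ b.bestRun = [] ∧ d.2.2 = false) ∧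
  (∀ M, σ.m = some M → 0 ≤ M ∧ 1 ≤ σ.l ∧ 0 ≤ σ.s ∧ σ.s ≤ σ.e ∧ σ.e < i ∧
    (d.2.2 = false → PySem.List.slice Arr (some σ.s) (some (σ.e + 1)) = b.bestRun ∧ b.bestRun ≠ []) ∧
    (d.2.2 = true → ∃ jn : ℕ, PySem.List.slice Arr (some σ.s) (some (σ.e + 1)) = b.bestRun.take jn ∧
      jn < b.bestRun.length))

-- ---- small arithmetic facts about firstHit ----

theorem firstHit_bounds (v : List Int) : ∀ t, v ≠ [] → (∀ x ∈ v, 0 ≤ x) →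
    1 ≤ firstHit t (t + v.sum) v ∧ firstHit t (t + v.sum) v ≤ v.length := by
  induction v with
  | nil => simp
  | cons x u ih =>
    intro t _ hpos
    by_cases hx : t + x = t + (x :: u).sum
    · simp [firstHit, hx]
    · have hu : u ≠ [] := by
        rintro rfl
        simp at hx
      have := ih (t + x) hu (fun y hy => hpos y (List.mem_cons_of_mem _ hy))
      have harr : t + (x :: u).sum = (t + x) + u.sum := by simp; ring
      rw [harr] at hx ⊢
      simp only [firstHit, if_neg hx]
      simp at this ⊢
      omega

theorem firstHit_of_getLast_pos (v : List Int) : ∀ t (x : Int), v.getLast? = some x → 0 < x →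
    (∀ y ∈ v, 0 ≤ y) → firstHit t (t + v.sum) v = v.length := by
  induction v with
  | nil => simp
  | cons y u ih =>
    intro t x hlast hx hpos
    cases u with
    | nil =>
      simp at hlast
      simp [firstHit]
    | cons z u' =>
      have hlast' : (z :: u').getLast? = some x := by
        rw [List.getLast?_cons_cons] at hlast
        exact hlast
      have hposu : ∀ y' ∈ z :: u', 0 ≤ y' := fun y' hy => hpos y' (List.mem_cons_of_mem _ hy)
      have hmem : x ∈ z :: u' := List.mem_of_getLast? hlast'
      have hsum : x ≤ (z :: u').sum := List.single_le_sum hposu x hmem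
      have hne : t + y ≠ t + (y :: z :: u').sum := by
        have : (y :: z :: u').sum = y + (z :: u').sum := by simp
        omega
      have harr : t + (y :: z :: u').sum = (t + y) + (z :: u').sum := by simp; ring
      rw [harr] at hne ⊢
      have hIH := ih (t + y) x hlast' hx hposu
      simp only [firstHit] at hIH
      simp only [firstHit, if_neg hne]
      rw [hIH]
      simp
      omega

theorem firstHit_of_getLast_zero (v : List Int) : ∀ t, v.getLast? = some 0 → 0 < v.sum →
    (∀ y ∈ v, 0 ≤ y) → firstHit t (t + v.sum) v < v.length := by
  induction v with
  | nil => simp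
  | cons y u ih =>
    intro t hlast hsum hpos
    cases u with
    | nil =>
      simp at hlast
      subst hlast
      simp at hsum
    | cons z u' =>
      by_cases hy : t + y = t + (y :: z :: u').sum
      · simp only [firstHit, if_pos hy]
        simp
      · have hlast' : (z :: u').getLast? = some 0 := by
          rw [List.getLast?_cons_cons] at hlast
          exact hlast
        have hposu : ∀ y' ∈ z :: u', 0 ≤ y' := fun y' hy' => hpos y' (List.mem_cons_of_mem _ hy')
        have hsz : (z :: u').sum ≠ 0 := by
          have : (y :: z :: u').sum = y + (z :: u').sum := by simp
          omega
        have hsz' : 0 < (z :: u').sum := by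
          have h0 : (0 : Int) ≤ (z :: u').sum := List.sum_nonneg hposu
          omega
        have harr : t + (y :: z :: u').sum = (t + y) + (z :: u').sum := by simp; ring
        rw [harr] at hy ⊢
        have hIH := ih (t + y) hlast' hsz' hposu
        simp only [firstHit] at hIH
        simp only [firstHit, if_neg hy]
        simp at hIH ⊢
        omega

-- ---- scan1 = specScan ----

-- one step of the inner scan, abstracted (j = k + c, tmp = t + x)
def stepA (k c t x : Int) (σ : StA) : StA :=
  let tmp := t + x
  let σ1 := if gtM σ.m tmp then ⟨some tmp, σ.l, k, k + c⟩ else σ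
  if eqM σ1.m tmp && decide (σ1.l ≤ c + 1) then ⟨some tmp, c + 1, k, k + c⟩ else σ1

set_option maxHeartbeats 2000000 in
set_option maxRecDepth 8000 in
theorem specScan_cons (k c t x : Int) (u : List Int) (σ : StA) (hx : 0 ≤ x)
    (hpos : ∀ y ∈ u, 0 ≤ y) :
    specScan k (c+1) (t+x) (stepA k c t x σ) u = specScan k c t σ (x :: u) := by
  rcases σ with ⟨m, l, s, e⟩
  have hSu : 0 ≤ u.sum := List.sum_nonneg hpos
  by_cases hu : u = []
  · subst hu
    cases m with
    | none =>
      simp only [specScan, stepA, gtM, eqM, List.sum_cons, List.sum_nil, List.length_cons,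
        List.length_nil, firstHit, decide_eq_true_eq, Bool.and_eq_true, if_true]
      split_ifs <;>
        first | rfl | omega | (exfalso; omega) | (simp_all; omega) | simp_all
    | some M =>
      simp only [specScan, stepA, gtM, eqM, List.sum_cons, List.sum_nil, List.length_cons,
        List.length_nil, firstHit, decide_eq_true_eq, Bool.and_eq_true]
      split_ifs <;>
        first | rfl | omega | (exfalso; omega) | (simp_all; omega) | simp_all
  · have hne : (x :: u) ≠ [] := by simp
    have hT : t + (x :: u).sum = (t + x) + u.sum := by simp; ring
    have hfh : firstHit t (t + (x :: u).sum) (x :: u)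
        = if t + x = (t + x) + u.sum then 1 else 1 + firstHit (t + x) ((t + x) + u.sum) u := by
      simp only [firstHit, hT]
    have hLen : ((x :: u).length : Int) = (u.length : Int) + 1 := by simp
    have hF := firstHit_bounds u (t + x) hu hpos
    have hL1 : 1 ≤ (u.length : Int) := by
      cases u
      · simp at hu
      · simp
    simp only [specScan, stepA, gtM, eqM, if_neg hu, if_neg hne, hT, hfh, hLen,
      decide_eq_true_eq, Bool.and_eq_true]
    cases m with
    | none =>
      split_ifs <;> simp_all [StA.mk.injEq] <;> (try split_ifs) <;> simp_all [StA.mk.injEq] <;> omega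
    | some M =>
      split_ifs <;> simp_all [StA.mk.injEq] <;> (try split_ifs) <;> simp_all [StA.mk.injEq] <;> omega

theorem scan1_eq_spec (v : List Int) : ∀ (k c t : Int) (σ : StA), (∀ x ∈ v, 0 ≤ x) →
    scan1 k σ (k + c) t v = specScan k c t σ v := by
  induction v with
  | nil => intro k c t σ _; simp [scan1, specScan]
  | cons x u ih =>
    intro k c t σ hpos
    have hx : 0 ≤ x := hpos x (by simp)
    have hposu : ∀ y ∈ u, 0 ≤ y := fun y hy => hpos y (by simp [hy])
    have harith : k + c - k + 1 = c + 1 := by ring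
    have harith2 : k + c + 1 = k + (c + 1) := by ring
    have hstep : scan1 k σ (k + c) t (x :: u)
        = scan1 k (stepA k c t x σ) (k + (c + 1)) (t + x) u := by
      simp only [scan1, stepA, harith, harith2]
    rw [hstep, ih k (c+1) (t+x) (stepA k c t x σ) hposu, specScan_cons k c t x u σ hx hposu]

-- ---- later starts inside a run are no-ops ----

theorem runA_noop (u : List Int) : ∀ (k : Int) (σ : StA) (M : Int), (∀ x ∈ u, 0 ≤ x) →
    σ.m = some M → u.sum ≤ M → (u.sum = M → (u.length : Int) < σ.l) → runA k σ u = σ := by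
  induction u with
  | nil => intro k σ M _ _ _ _; rfl
  | cons x u ih =>
    intro k σ M hpos hm hle hlen
    have hx : 0 ≤ x := hpos x (by simp)
    have hposu : ∀ y ∈ u, 0 ≤ y := fun y hy => hpos y (by simp [hy])
    have hsu : 0 ≤ u.sum := List.sum_nonneg hposu
    have hsum : (x :: u).sum = x + u.sum := by simp
    have hLen : ((x :: u).length : Int) = (u.length : Int) + 1 := by simp
    have hscan : scan1 k σ k 0 (x :: u) = specScan k 0 0 σ (x :: u) := by
      have h := scan1_eq_spec (x :: u) k 0 0 σ hpos
      simpa using h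
    have hspec : specScan k 0 0 σ (x :: u) = σ := by
      rcases σ with ⟨m, l, s, e⟩
      simp only [StA.m] at hm
      subst hm
      simp only [StA.l] at hlen
      have hne : (x :: u) ≠ [] := by simp
      simp only [specScan, if_neg hne]
      by_cases hSM : (x :: u).sum = M
      · have hlen' := hlen hSM
        split_ifs <;> first | rfl | (exfalso; omega)
      · split_ifs <;> first | rfl | (exfalso; omega)
    simp only [runA, hscan, hspec]
    exact ih (k + 1) σ M hposu hm (by omega) (fun h => by
      have hx0 : (x :: u).sum = M := by omega
      have := hlen hx0
      omega)

theorem specScan_post (v : List Int) (k : Int) (σ : StA) (hne : v ≠ []) (hpos : ∀ x ∈ v, 0 ≤ x)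
    (hl : σ.m = none → σ.l = 0) :
    ∃ M', (specScan k 0 0 σ v).m = some M' ∧ v.sum ≤ M' ∧
      (v.sum = M' → (v.length : Int) ≤ (specScan k 0 0 σ v).l) := by
  have hL : (0 : Int) ≤ (v.length : Int) := by positivity
  rcases σ with ⟨m, l, s, e⟩
  cases m with
  | none =>
    have hl0 : l = 0 := hl rfl
    simp only [specScan, if_neg hne]
    split_ifs <;> exact ⟨0 + v.sum, rfl, by omega, by intro h; simp only [StA.l]; omega⟩
  | some M =>
    simp only [specScan, if_neg hne]
    split_ifs with h1 h2 h3
    · exact ⟨M, rfl, by omega, by intro h; simp only [StA.l]; omega⟩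
    · exact ⟨0 + v.sum, rfl, by omega, by intro h; simp only [StA.l]; omega⟩
    · exact ⟨M, rfl, by omega, by intro h; simp only [StA.l]; omega⟩
    · exact ⟨0 + v.sum, rfl, by omega, by intro h; simp only [StA.l]; omega⟩

theorem runA_eq_chalA (v : List Int) (k : Int) (σ : StA) (hne : v ≠ []) (hpos : ∀ x ∈ v, 0 ≤ x)
    (hl : σ.m = none → σ.l = 0) : runA k σ v = chalA k σ v := by
  cases v with
  | nil => exact absurd rfl hne
  | cons x u =>
    have hx : 0 ≤ x := hpos x (by simp)
    have hposu : ∀ y ∈ u, 0 ≤ y := fun y hy => hpos y (by simp [hy])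
    have hsu : 0 ≤ u.sum := List.sum_nonneg hposu
    have hsum : (x :: u).sum = x + u.sum := by simp
    have hLen : ((x :: u).length : Int) = (u.length : Int) + 1 := by simp
    have hscan : scan1 k σ k 0 (x :: u) = specScan k 0 0 σ (x :: u) := by
      have h := scan1_eq_spec (x :: u) k 0 0 σ hpos
      simpa using h
    obtain ⟨M', hm', hle', himp'⟩ := specScan_post (x :: u) k σ hne hpos hl
    simp only [runA, hscan, chalA]
    exact runA_noop u (k + 1) _ M' hposu hm' (by omega) (fun h => by
      have hx0 : (x :: u).sum = M' := by omega
      have := himp' hx0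
      omega)

-- ---- outer loop bridges ----

theorem drop_lt_length (Arr : List Int) (j : Int) (y : Int) (w' : List Int)
    (hj : 0 ≤ j) (hdrop : Arr.drop j.toNat = y :: w') : j < (Arr.length : Int) := by
  by_contra hc
  push_neg at hc
  have hle : Arr.length ≤ j.toNat := by omega
  rw [List.drop_eq_nil_of_le hle] at hdrop
  exact absurd hdrop (by simp)

theorem getD_of_drop (Arr : List Int) (j : Int) (y : Int) (w' : List Int)
    (hj : 0 ≤ j) (hdrop : Arr.drop j.toNat = y :: w') : PySem.List.pyGetD Arr j 0 = y := by
  have hlt : j < (Arr.length : Int) := drop_lt_length Arr j y w' hj hdrop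
  rw [PySem.List.pyGetD_eq_getElem Arr 0 hj hlt]
  have h0 : (Arr.drop j.toNat)[0]? = some y := by rw [hdrop]; rfl
  rw [List.getElem?_drop] at h0
  simp only [Nat.add_zero] at h0
  have hlen : j.toNat < Arr.length := by omega
  rw [List.getElem?_eq_getElem hlen] at h0
  exact Option.some.inj h0

theorem slice_sum_step (Arr : List Int) (i j y : Int) (w' : List Int)
    (hi : 0 ≤ i) (hij : i ≤ j) (hdrop : Arr.drop j.toNat = y :: w') :
    (PySem.List.slice Arr (some i) (some (j + 1))).sum
      = (PySem.List.slice Arr (some i) (some j)).sum + y := by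
  have hj : 0 ≤ j := le_trans hi hij
  have hj1 : 0 ≤ j + 1 := by omega
  rw [PySem.List.slice_toNat Arr hi hj, PySem.List.slice_toNat Arr hi hj1]
  have h2 : (j + 1).toNat - i.toNat = (j.toNat - i.toNat) + 1 := by omega
  rw [h2, List.take_succ]
  have hy : (Arr.drop i.toNat)[j.toNat - i.toNat]? = some y := by
    rw [List.getElem?_drop]
    have h3 : i.toNat + (j.toNat - i.toNat) = j.toNat := by omega
    rw [h3]
    have h0 : (Arr.drop j.toNat)[0]? = some y := by rw [hdrop]; rfl
    rw [List.getElem?_drop] at h0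
    simpa using h0
  rw [hy]
  simp

theorem innerA_eq_scan1 (Arr : List Int) (i : Int) : ∀ (w : List Int) (j t : Int) (σ : StA),
    0 ≤ i → i ≤ j → Arr.drop j.toNat = w → t = (PySem.List.slice Arr (some i) (some j)).sum →
    innerA Arr i σ (PySem.List.pyRange j (Arr.length : Int) 1) = scan1 i σ j t (w.takeWhile pvPos) := by
  intro w
  induction w with
  | nil =>
    intro j t σ hi hij hdrop ht
    have hj : 0 ≤ j := le_trans hi hij
    have hnil : PySem.List.pyRange j (Arr.length : Int) 1 = [] := by
      apply PySem.List.pyRange_one_eq_nil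
      have : Arr.length ≤ j.toNat := by
        by_contra hc
        push_neg at hc
        rw [List.drop_eq_nil_iff] at hdrop
        omega
      omega
    rw [hnil]
    rfl
  | cons y w' ih =>
    intro j t σ hi hij hdrop ht
    have hj : 0 ≤ j := le_trans hi hij
    have hlt : j < (Arr.length : Int) := drop_lt_length Arr j y w' hj hdrop
    rw [PySem.List.pyRange_one_cons hlt]
    have hget : PySem.List.pyGetD Arr j 0 = y := getD_of_drop Arr j y w' hj hdrop
    by_cases hy : 0 ≤ y
    · have htw : (y :: w').takeWhile pvPos = y :: w'.takeWhile pvPos := by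
        simp [List.takeWhile_cons, pvPos, hy]
      have htmp : (PySem.List.slice Arr (some i) (some (j + 1))).sum = t + y := by
        rw [slice_sum_step Arr i j y w' hi hij hdrop, ht]
      have hdrop' : Arr.drop (j + 1).toNat = w' := by
        have : (j + 1).toNat = j.toNat + 1 := by omega
        rw [this, ← List.drop_drop, hdrop]
        rfl
      have hrec := ih (j + 1) (t + y) (if eqM (if gtM σ.m (t + y) then (⟨some (t + y), σ.l, i, j⟩ : StA) else σ).m (t + y) && decide ((if gtM σ.m (t + y) then (⟨some (t + y), σ.l, i, j⟩ : StA) else σ).l ≤ j - i + 1) then (⟨some (t + y), j - i + 1, i, j⟩ : StA) else (if gtM σ.m (t + y) then (⟨some (t + y), σ.l, i, j⟩ : StA) else σ)) hi (by omega) hdrop' (by rw [htmp])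
      rw [htw]
      simp only [innerA, hget, htmp, scan1, hy, if_true]
      exact hrec
    · rw [innerA]
      simp only [hget, if_neg hy]
      have htw : (y :: w').takeWhile pvPos = [] := by
        simp [List.takeWhile_cons, pvPos, hy]
      rw [htw]
      rfl

theorem slice_empty (Arr : List Int) (i : Int) (hi : 0 ≤ i) :
    PySem.List.slice Arr (some i) (some i) = [] := by
  rw [PySem.List.slice_toNat Arr hi hi]
  simp

theorem outer_eq_outerSim (Arr : List Int) : ∀ (w : List Int) (i : Int) (σ : StA),
    0 ≤ i → Arr.drop i.toNat = w →
    (PySem.List.pyRange i (Arr.length : Int) 1).foldl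
      (fun σ j => if 0 ≤ PySem.List.pyGetD Arr j 0 then innerA Arr j σ (PySem.List.pyRange j (Arr.length : Int) 1) else σ) σ
      = outerSim Arr i w σ := by
  intro w
  induction w with
  | nil =>
    intro i σ hi hdrop
    have hnil : PySem.List.pyRange i (Arr.length : Int) 1 = [] := by
      apply PySem.List.pyRange_one_eq_nil
      rw [List.drop_eq_nil_iff] at hdrop
      omega
    rw [hnil]
    rfl
  | cons x u ih =>
    intro i σ hi hdrop
    have hlt : i < (Arr.length : Int) := drop_lt_length Arr i x u hi hdrop
    have hget : PySem.List.pyGetD Arr i 0 = x := getD_of_drop Arr i x u hi hdrop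
    have hdrop' : Arr.drop (i + 1).toNat = u := by
      have : (i + 1).toNat = i.toNat + 1 := by omega
      rw [this, ← List.drop_drop, hdrop]
      rfl
    rw [PySem.List.pyRange_one_cons hlt, List.foldl_cons, ih (i + 1) _ (by omega) hdrop']
    simp only [outerSim, hget]
    congr 1
    by_cases hx : 0 ≤ x
    · simp only [if_pos hx]
      rw [innerA_eq_scan1 Arr i (x :: u) i 0 σ hi le_rfl hdrop (by rw [slice_empty Arr i hi]; rfl)]
    · simp [hx]

theorem takeWhile_append_block (v rest : List Int) (hpos : ∀ x ∈ v, 0 ≤ x)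
    (hrest : rest = [] ∨ ∃ y u', rest = y :: u' ∧ y < 0) :
    (v ++ rest).takeWhile pvPos = v ∧ (v ++ rest).dropWhile pvPos = rest := by
  induction v with
  | nil =>
    rcases hrest with rfl | ⟨y, u', rfl, hy⟩
    · simp
    · constructor <;> simp [pvPos] <;> omega
  | cons x v' ih =>
    obtain ⟨h1, h2⟩ := ih (fun y hy => hpos y (by simp [hy]))
    have hx : 0 ≤ x := hpos x (by simp)
    constructor
    · simp only [List.cons_append, List.takeWhile_cons]
      simp [pvPos, hx, h1]
    · simp only [List.cons_append, List.dropWhile_cons]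
      simp [pvPos, hx, h2]

theorem outerSim_run (Arr : List Int) : ∀ (v : List Int) (rest : List Int) (i : Int) (σ : StA),
    (∀ x ∈ v, 0 ≤ x) → (rest = [] ∨ ∃ y u', rest = y :: u' ∧ y < 0) →
    outerSim Arr i (v ++ rest) σ = outerSim Arr (i + v.length) rest (runA i σ v) := by
  intro v
  induction v with
  | nil => intro rest i σ _ _; simp [runA]
  | cons x v' ih =>
    intro rest i σ hpos hrest
    have hx : 0 ≤ x := hpos x (by simp)
    have hpos' : ∀ y ∈ v', 0 ≤ y := fun y hy => hpos y (by simp [hy])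
    have htw : (v' ++ rest).takeWhile pvPos = v' := (takeWhile_append_block v' rest hpos' hrest).1
    have htw2 : ((x :: v') ++ rest).takeWhile pvPos = x :: v' := by
      simp only [List.cons_append, List.takeWhile_cons, pvPos, decide_eq_true_eq, if_pos hx]
      rw [show (v' ++ rest).takeWhile pvPos = v' from htw]
    have harith : i + 1 + (v'.length : Int) = i + ((x :: v').length : Int) := by
      simp
      ring
    calc outerSim Arr i ((x :: v') ++ rest) σ
        = outerSim Arr (i + 1) (v' ++ rest) (scan1 i σ i 0 (x :: v')) := by
          simp only [List.cons_append, outerSim, if_pos hx]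
          rw [show ((x :: (v' ++ rest)).takeWhile pvPos) = x :: v' from htw2]
      _ = outerSim Arr (i + 1 + v'.length) rest (runA (i + 1) (scan1 i σ i 0 (x :: v')) v') :=
          ih rest (i + 1) _ hpos' hrest
      _ = outerSim Arr (i + ((x :: v').length : Int)) rest (runA i σ (x :: v')) := by
          rw [harith]
          rfl

theorem dropWhile_block (u : List Int) :
    u.dropWhile pvPos = [] ∨ ∃ y u', u.dropWhile pvPos = y :: u' ∧ y < 0 := by
  induction u with
  | nil => left; rfl
  | cons x u ih =>
    by_cases hx : 0 ≤ x
    · simpa [List.dropWhile_cons, pvPos, hx] using ih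
    · right
      exact ⟨x, u, by simp [List.dropWhile_cons, pvPos, hx], by omega⟩

theorem chalA_post (v : List Int) (k : Int) (σ : StA) (hne : v ≠ []) (hpos : ∀ x ∈ v, 0 ≤ x)
    (hl : σ.m = none → σ.l = 0) (hsl : ∀ M, σ.m = some M → 1 ≤ σ.l) :
    (∃ M', (chalA k σ v).m = some M') ∧ 1 ≤ (chalA k σ v).l := by
  have hL : (1 : Int) ≤ (v.length : Int) := by
    cases v
    · simp at hne
    · simp
  rcases σ with ⟨m, l, s, e⟩
  cases m with
  | none =>
    have hl0 : l = 0 := hl rfl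
    simp only [chalA, specScan, if_neg hne]
    split_ifs <;> simp <;> omega
  | some M =>
    have hl1 : 1 ≤ l := hsl M rfl
    simp only [chalA, specScan, if_neg hne]
    split_ifs <;> simp <;> omega

theorem outerSim_eq_foldRunsA (Arr : List Int) : ∀ (n : ℕ) (w : List Int), w.length ≤ n →
    ∀ (i : Int) (σ : StA), (σ.m = none → σ.l = 0) → (∀ M, σ.m = some M → 1 ≤ σ.l) →
    outerSim Arr i w σ = foldRunsA Arr i w σ := by
  intro n
  induction n with
  | zero =>
    intro w hw i σ _ _
    have hw0 : w = [] := List.length_eq_zero_iff.mp (by omega)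
    subst hw0
    simp [outerSim, foldRunsA]
  | succ n ih =>
    intro w hw i σ hl hsl
    cases w with
    | nil => simp [outerSim, foldRunsA]
    | cons x u =>
      by_cases hx : 0 ≤ x
      · have hposv : ∀ y ∈ x :: u.takeWhile pvPos, 0 ≤ y := by
          intro y hy
          rcases List.mem_cons.mp hy with rfl | hy'
          · exact hx
          · have := List.mem_takeWhile_imp hy'
            simpa [pvPos] using this
        have hsplit : x :: u = (x :: u.takeWhile pvPos) ++ u.dropWhile pvPos := by
          simp [List.takeWhile_append_dropWhile]
        have hrest := dropWhile_block u
        have hne : (x :: u.takeWhile pvPos) ≠ [] := by simp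
        have hrun := outerSim_run Arr (x :: u.takeWhile pvPos) (u.dropWhile pvPos) i σ hposv hrest
        have hchal := runA_eq_chalA (x :: u.takeWhile pvPos) i σ hne hposv hl
        have hpost := chalA_post (x :: u.takeWhile pvPos) i σ hne hposv hl hsl
        have hlen : (u.dropWhile pvPos).length ≤ n := by
          have h1 := u.length_dropWhile_le pvPos
          simp at hw
          omega
        calc outerSim Arr i (x :: u) σ
            = outerSim Arr (i + ((x :: u.takeWhile pvPos).length : Int)) (u.dropWhile pvPos)
                (runA i σ (x :: u.takeWhile pvPos)) := by rw [hsplit] at *; exact hrun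
          _ = foldRunsA Arr (i + ((x :: u.takeWhile pvPos).length : Int)) (u.dropWhile pvPos)
                (chalA i σ (x :: u.takeWhile pvPos)) := by
                rw [hchal]
                exact ih (u.dropWhile pvPos) hlen _ _
                  (by rintro h; rcases hpost.1 with ⟨M', hM'⟩; rw [h] at hM'; cases hM')
                  (fun M _ => hpost.2)
          _ = foldRunsA Arr i (x :: u) σ := by
                rw [foldRunsA]
                simp only [if_pos hx]
                congr 1
                simp
                ring
      · rw [foldRunsA]
        simp only [if_neg hx]
        rw [← ih u (by simp at hw; omega) (i + 1) σ hl hsl]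
        simp [outerSim, hx]

-- ---- B-side bridge ----

def finB (st : StB × List Int × Int) : StB :=
  if st.2.1 ≠ [] then
    let c := challenge st.1.bestRun st.1.bestSum st.1.recordLen st.2.1 st.2.2
    ⟨c.1, c.2.1, c.2.2⟩
  else st.1

theorem foldB_go (w : List Int) : ∀ (b : StB) (r : List Int),
    finB (w.foldl stepB (b, r, r.sum)) = (pvRunsGo r w).foldl chalB b := by
  induction w with
  | nil =>
    intro b r
    by_cases hr : r = [] <;> simp [finB, pvRunsGo, hr, chalB]
  | cons x w ih =>
    intro b r
    by_cases hx : 0 ≤ x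
    · have h1 : stepB (b, r, r.sum) x = (b, r ++ [x], (r ++ [x]).sum) := by
        simp [stepB, hx]
      rw [List.foldl_cons, h1, ih b (r ++ [x])]
      simp [pvRunsGo, hx]
    · by_cases hr : r = []
      · subst hr
        have h1 : stepB (b, [], List.sum []) x = (b, [], List.sum []) := by
          simp [stepB, hx]
        rw [List.foldl_cons, h1, ih b []]
        simp [pvRunsGo, hx]
      · have h1 : stepB (b, r, r.sum) x = (chalB b r, [], List.sum []) := by
          simp [stepB, hx, hr, chalB]
        rw [List.foldl_cons, h1, ih (chalB b r) []]
        simp [pvRunsGo, hx, hr]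

theorem alt_eq_runs (A : List Int) :
    max_sum_pos_subarray_alt A = ((pvRuns A).foldl chalB ⟨[], none, 0⟩).bestRun := by
  have h := foldB_go A ⟨[], none, 0⟩ []
  simp only [List.sum_nil] at h
  simp only [max_sum_pos_subarray_alt, pvRuns]
  rw [← h]
  rfl

-- ---- the parallel step: one run preserves the invariant ----

theorem chal_preserve (Arr : List Int) (i : Int) (v : List Int) (σ : StA) (b : StB)
    (d : Option Int × Int × Bool) (hne : v ≠ []) (hpos : ∀ x ∈ v, 0 ≤ x) (hi : 0 ≤ i)
    (hsl : ∀ c : ℕ, c ≤ v.length → PySem.List.slice Arr (some i) (some (i + c)) = v.take c)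
    (hInv : pvInv Arr i σ b d) :
    pvInv Arr (i + v.length) (chalA i σ v) (chalB b v) (pvDRef d v) := by
  have hL1 : (1 : Int) ≤ (v.length : Int) := by
    cases v
    · simp at hne
    · simp
  have hS0 : 0 ≤ v.sum := List.sum_nonneg hpos
  have hslice_full : PySem.List.slice Arr (some i) (some (i + (v.length : Int))) = v := by
    have h := hsl v.length le_rfl
    simpa using h
  obtain ⟨hmb, hmd, hlb, hld, hnone, hsome⟩ := hInv
  rcases σ with ⟨m, l, s, e⟩
  rcases b with ⟨br, bs, rl⟩
  rcases d with ⟨dm, dl, dd⟩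
  simp only [StA.m, StA.l, StB.bestSum, StB.recordLen] at hmb hmd hlb hld hnone hsome
  subst hmb hmd hlb hld
  cases m with
  | none =>
    obtain ⟨hl0, hs, he, hbr, hdd⟩ := hnone rfl
    subst hl0 hs he hbr hdd
    have hA : chalA i ⟨none, 0, -1, -1⟩ v
        = ⟨some (0 + v.sum), 0 + (v.length : Int), i, i + 0 + (v.length : Int) - 1⟩ := by
      simp only [chalA, specScan, if_neg hne]
      rw [if_pos (by omega)]
    have hB : chalB ⟨[], none, 0⟩ v = ⟨v, some v.sum, (v.length : Int)⟩ := by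
      simp [chalB, challenge, gtM, eqM]
    have hD : pvDRef (none, 0, false) v = (some v.sum, (v.length : Int), false) := by
      simp [pvDRef, gtM, Int.natCast_nonneg]
    rw [hA, hB, hD]
    refine ⟨by simp, by simp, by simp, by simp, by intro h; simp at h, ?_⟩
    intro M hM
    simp only [StA.m, Option.some.injEq] at hM
    refine ⟨by omega, by show (1:Int) ≤ 0 + (v.length : Int); omega,
      by show (0:Int) ≤ i; omega, by show i ≤ i + 0 + (v.length : Int) - 1; omega,
      by show i + 0 + (v.length : Int) - 1 < i + (v.length : Int); omega, ?_, ?_⟩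
    · intro _
      constructor
      · show PySem.List.slice Arr (some i) (some (i + 0 + (v.length : Int) - 1 + 1)) = v
        have harg : i + 0 + (v.length : Int) - 1 + 1 = i + (v.length : Int) := by omega
        rw [harg]
        exact hslice_full
      · show v ≠ []
        exact hne
    · intro h
      simp at h
  | some M =>
    obtain ⟨hM0, hl1, hs0, hse, hei, hwin, hwint⟩ := hsome M rfl
    by_cases hc1 : v.sum < M
    · -- strictly worse run: everything unchanged
      have hA : chalA i ⟨some M, l, s, e⟩ v = ⟨some M, l, s, e⟩ := by
        simp only [chalA, specScan, if_neg hne]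
        rw [if_pos (by omega)]
      have hB : chalB ⟨br, some M, l⟩ v = ⟨br, some M, l⟩ := by
        simp only [chalB, challenge, gtM, eqM]
        split_ifs <;> first | rfl | (exfalso; simp_all; try omega)
      have hD : pvDRef (some M, l, dd) v = (some M, l, dd) := by
        simp only [pvDRef, gtM, eqM]
        split_ifs <;> first | rfl | (exfalso; simp_all; try omega)
      rw [hA, hB, hD]
      refine ⟨rfl, rfl, rfl, rfl, by intro h; simp at h, ?_⟩
      intro M' hM'
      simp only [StA.m, Option.some.injEq] at hM'
      exact ⟨by omega, hl1, hs0, hse, by show e < i + (v.length : Int); omega, hwin, hwint⟩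
    · by_cases hc2 : l ≤ (v.length : Int)
      · -- winning or tying run at least as long as the record: the full run becomes the window
        have hA : chalA i ⟨some M, l, s, e⟩ v
            = ⟨some (0 + v.sum), 0 + (v.length : Int), i, i + 0 + (v.length : Int) - 1⟩ := by
          simp only [chalA, specScan, if_neg hne]
          rw [if_neg (by omega), if_pos (by omega)]
        have hwindow : ∀ dd' : Bool, dd' = false →
            pvInv Arr (i + v.length)
              ⟨some (0 + v.sum), 0 + (v.length : Int), i, i + 0 + (v.length : Int) - 1⟩
              ⟨v, some v.sum, (v.length : Int)⟩ (some v.sum, (v.length : Int), dd') := by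
          rintro _ rfl
          refine ⟨by simp, by simp, by simp, by simp, by intro h; simp at h, ?_⟩
          intro M' hM'
          simp only [StA.m, Option.some.injEq] at hM'
          refine ⟨by omega, by show (1:Int) ≤ 0 + (v.length : Int); omega,
            by show (0:Int) ≤ i; omega, by show i ≤ i + 0 + (v.length : Int) - 1; omega,
            by show i + 0 + (v.length : Int) - 1 < i + (v.length : Int); omega, ?_, ?_⟩
          · intro _
            constructor
            · show PySem.List.slice Arr (some i) (some (i + 0 + (v.length : Int) - 1 + 1)) = v
              have harg : i + 0 + (v.length : Int) - 1 + 1 = i + (v.length : Int) := by omega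
              rw [harg]
              exact hslice_full
            · show v ≠ []
              exact hne
          · intro h
            simp at h
        by_cases hgt : M < v.sum
        · have hB : chalB ⟨br, some M, l⟩ v = ⟨v, some v.sum, (v.length : Int)⟩ := by
            simp [chalB, challenge, gtM, eqM, hgt, hc2]
          have hD : pvDRef (some M, l, dd) v = (some v.sum, (v.length : Int), false) := by
            simp only [pvDRef, gtM]
            rw [if_pos (by simp [hgt]), if_pos (by omega)]
          rw [hA, hB, hD]
          exact hwindow false rfl
        · have hEq : v.sum = M := by omega
          have hB : chalB ⟨br, some M, l⟩ v = ⟨v, some M, (v.length : Int)⟩ := by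
            simp only [chalB, challenge, gtM, eqM]
            split_ifs <;> first | rfl | (exfalso; simp_all; try omega)
          have hD : pvDRef (some M, l, dd) v = (some M, (v.length : Int), false) := by
            simp only [pvDRef, gtM, eqM]
            split_ifs <;> first | rfl | (exfalso; simp_all; try omega)
          rw [hA, hB, hD]
          rw [hEq] at hwindow ⊢
          exact hwindow false rfl
      · by_cases hc3 : v.sum = M
        · -- tie, but shorter than the record: everything unchanged
          have hA : chalA i ⟨some M, l, s, e⟩ v = ⟨some M, l, s, e⟩ := by
            simp only [chalA, specScan, if_neg hne]
            rw [if_neg (by omega), if_neg (by omega), if_pos (by omega)]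
          have hB : chalB ⟨br, some M, l⟩ v = ⟨br, some M, l⟩ := by
            simp only [chalB, challenge, gtM, eqM]
            split_ifs <;> first | rfl | (exfalso; simp_all; try omega)
          have hD : pvDRef (some M, l, dd) v = (some M, l, dd) := by
            simp only [pvDRef, gtM, eqM]
            split_ifs <;> first | rfl | (exfalso; simp_all; try omega)
          rw [hA, hB, hD]
          refine ⟨rfl, rfl, rfl, rfl, by intro h; simp at h, ?_⟩
          intro M' hM'
          simp only [StA.m, Option.some.injEq] at hM'
          exact ⟨by omega, hl1, hs0, hse, by show e < i + (v.length : Int); omega, hwin, hwint⟩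
        · -- strictly better but shorter than the record: A trims at the first prefix reaching the sum
          have hgt : M < v.sum := by omega
          have hfh := firstHit_bounds v 0 hne hpos
          have hfh1 : 1 ≤ firstHit 0 (0 + v.sum) v := hfh.1
          have hfh2 : firstHit 0 (0 + v.sum) v ≤ (v.length : Int) := hfh.2
          have hA : chalA i ⟨some M, l, s, e⟩ v
              = ⟨some (0 + v.sum), l, i, i + 0 + firstHit 0 (0 + v.sum) v - 1⟩ := by
            simp only [chalA, specScan, if_neg hne]
            rw [if_neg (by omega), if_neg (by omega), if_neg (by omega)]
          have hB : chalB ⟨br, some M, l⟩ v = ⟨v, some v.sum, l⟩ := by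
            simp only [chalB, challenge, gtM, eqM]
            split_ifs <;> first | rfl | (exfalso; simp_all; try omega)
          have hD : pvDRef (some M, l, dd) v = (some v.sum, l, v.getLast? == some 0) := by
            simp only [pvDRef, gtM, eqM]
            split_ifs <;> first | rfl | (exfalso; simp_all; try omega)
          rw [hA, hB, hD]
          refine ⟨by simp, by simp, by simp, by simp, by intro h; simp at h, ?_⟩
          intro M' hM'
          simp only [StA.m, Option.some.injEq] at hM'
          refine ⟨by omega, by show (1:Int) ≤ l; omega, by show (0:Int) ≤ i; omega,
            by show i ≤ i + 0 + firstHit 0 (0 + v.sum) v - 1; omega,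
            by show i + 0 + firstHit 0 (0 + v.sum) v - 1 < i + (v.length : Int); omega, ?_, ?_⟩
          · -- diff = false: the run's last element is positive, so no trim happens
            intro hdd0
            simp only [beq_eq_false_iff_ne, ne_eq] at hdd0
            obtain ⟨x0, hx0⟩ := Option.isSome_iff_exists.mp (List.getLast?_isSome.mpr hne)
            have hmem : x0 ∈ v := List.mem_of_getLast? hx0
            have h1 : 0 ≤ x0 := hpos x0 hmem
            have h2 : x0 ≠ 0 := by
              intro h
              rw [h] at hx0
              exact hdd0 hx0
            have hfull : firstHit 0 (0 + v.sum) v = (v.length : Int) := by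
              have := firstHit_of_getLast_pos v 0 x0 hx0 (by omega) hpos
              omega
            constructor
            · show PySem.List.slice Arr (some i) (some (i + 0 + firstHit 0 (0 + v.sum) v - 1 + 1)) = v
              have harg : i + 0 + firstHit 0 (0 + v.sum) v - 1 + 1 = i + (v.length : Int) := by omega
              rw [harg]
              exact hslice_full
            · show v ≠ []
              exact hne
          · -- diff = true: the run ends in zero(s); the trimmed window is a proper prefix
            intro hdd1
            simp only [beq_iff_eq] at hdd1
            have hspos : 0 < v.sum := by omega
            have hlt : firstHit 0 (0 + v.sum) v < (v.length : Int) := by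
              have := firstHit_of_getLast_zero v 0 hdd1 hspos hpos
              omega
            refine ⟨(firstHit 0 (0 + v.sum) v).toNat, ?_, ?_⟩
            · show PySem.List.slice Arr (some i) (some (i + 0 + firstHit 0 (0 + v.sum) v - 1 + 1))
                  = v.take (firstHit 0 (0 + v.sum) v).toNat
              have harg : i + 0 + firstHit 0 (0 + v.sum) v - 1 + 1
                  = i + ((firstHit 0 (0 + v.sum) v).toNat : Int) := by omega
              rw [harg]
              exact hsl (firstHit 0 (0 + v.sum) v).toNat (by omega)
            · show (firstHit 0 (0 + v.sum) v).toNat < v.length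
              omega

theorem pvInv_mono (Arr : List Int) (i i' : Int) (σ : StA) (b : StB)
    (d : Option Int × Int × Bool) (h : i ≤ i') (hInv : pvInv Arr i σ b d) :
    pvInv Arr i' σ b d := by
  obtain ⟨h1, h2, h3, h4, h5, h6⟩ := hInv
  refine ⟨h1, h2, h3, h4, h5, fun M hM => ?_⟩
  obtain ⟨a1, a2, a3, a4, a5, a6, a7⟩ := h6 M hM
  exact ⟨a1, a2, a3, a4, by omega, a6, a7⟩

theorem pvRunsGo_acc : ∀ (w r : List Int), r ≠ [] →
    pvRunsGo r w = (r ++ w.takeWhile pvPos) :: pvRunsGo [] (w.dropWhile pvPos) := by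
  intro w
  induction w with
  | nil => intro r hr; simp [pvRunsGo, hr]
  | cons x u ih =>
    intro r hr
    by_cases hx : 0 ≤ x
    · rw [show pvRunsGo r (x :: u) = pvRunsGo (r ++ [x]) u by simp [pvRunsGo, hx]]
      rw [ih (r ++ [x]) (by simp)]
      simp [List.takeWhile_cons, List.dropWhile_cons, pvPos, hx]
    · rw [show pvRunsGo r (x :: u) = r :: pvRunsGo [] u by simp [pvRunsGo, hx, hr]]
      rw [show (x :: u).takeWhile pvPos = [] by simp [List.takeWhile_cons, pvPos, hx]]
      rw [show (x :: u).dropWhile pvPos = x :: u by simp [List.dropWhile_cons, pvPos, hx]]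
      rw [show pvRunsGo [] (x :: u) = pvRunsGo [] u by simp [pvRunsGo, hx]]
      simp

theorem pvRuns_cons_pos (x : Int) (u : List Int) (hx : 0 ≤ x) :
    pvRuns (x :: u) = (x :: u.takeWhile pvPos) :: pvRuns (u.dropWhile pvPos) := by
  show pvRunsGo [] (x :: u) = _
  rw [show pvRunsGo [] (x :: u) = pvRunsGo [x] u by simp [pvRunsGo, hx]]
  rw [pvRunsGo_acc u [x] (by simp)]
  rfl

theorem pvRuns_cons_neg (x : Int) (u : List Int) (hx : ¬ 0 ≤ x) :
    pvRuns (x :: u) = pvRuns u := by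
  show pvRunsGo [] (x :: u) = pvRunsGo [] u
  simp [pvRunsGo, hx]

theorem slice_take (Arr : List Int) (i : Int) (v rest : List Int) (hi : 0 ≤ i)
    (hdrop : Arr.drop i.toNat = v ++ rest) :
    ∀ c : ℕ, c ≤ v.length → PySem.List.slice Arr (some i) (some (i + c)) = v.take c := by
  intro c hc
  rw [PySem.List.slice_toNat Arr hi (by omega)]
  have h1 : (i + (c : Int)).toNat - i.toNat = c := by omega
  rw [h1, hdrop]
  exact List.take_append_of_le_length hc

theorem fold_preserve (Arr : List Int) : ∀ (n : ℕ) (w : List Int), w.length ≤ n →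
    ∀ (i : Int) (σ : StA) (b : StB) (d : Option Int × Int × Bool),
    0 ≤ i → Arr.drop i.toNat = w → pvInv Arr i σ b d →
    pvInv Arr (i + w.length) (foldRunsA Arr i w σ) ((pvRuns w).foldl chalB b)
      ((pvRuns w).foldl pvDRef d) := by
  intro n
  induction n with
  | zero =>
    intro w hw i σ b d hi hdrop hInv
    have hw0 : w = [] := List.length_eq_zero_iff.mp (by omega)
    subst hw0
    simp only [foldRunsA, pvRuns, pvRunsGo, List.foldl_nil]
    exact pvInv_mono Arr i (i + ([] : List Int).length) σ b d (by simp) hInv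
  | succ n ih =>
    intro w hw i σ b d hi hdrop hInv
    cases w with
    | nil =>
      simp only [foldRunsA, pvRuns, pvRunsGo, List.foldl_nil]
      exact pvInv_mono Arr i (i + ([] : List Int).length) σ b d (by simp) hInv
    | cons x u =>
      by_cases hx : 0 ≤ x
      · have hposv : ∀ y ∈ x :: u.takeWhile pvPos, 0 ≤ y := by
          intro y hy
          rcases List.mem_cons.mp hy with rfl | hy'
          · exact hx
          · have := List.mem_takeWhile_imp hy'
            simpa [pvPos] using this
        have hne : (x :: u.takeWhile pvPos) ≠ [] := by simp
        have hsplit : x :: u = (x :: u.takeWhile pvPos) ++ u.dropWhile pvPos := by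
          simp [List.takeWhile_append_dropWhile]
        have hdropv : Arr.drop i.toNat = (x :: u.takeWhile pvPos) ++ u.dropWhile pvPos := by
          rw [hdrop]
          exact hsplit
        have hsl := slice_take Arr i (x :: u.takeWhile pvPos) (u.dropWhile pvPos) hi hdropv
        have hInv' := chal_preserve Arr i (x :: u.takeWhile pvPos) σ b d hne hposv hi hsl hInv
        have hdrop' : Arr.drop (i + ((x :: u.takeWhile pvPos).length : Int)).toNat
            = u.dropWhile pvPos := by
          have h2 : (i + ((x :: u.takeWhile pvPos).length : Int)).toNat
              = i.toNat + (x :: u.takeWhile pvPos).length := by omega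
          rw [h2, ← List.drop_drop, hdrop, hsplit]
          simp
          have hud := List.takeWhile_append_dropWhile (p := pvPos) (l := u)
          nth_rewrite 2 [← hud]
          exact List.drop_left
        have hlen : (u.dropWhile pvPos).length ≤ n := by
          have h1 := u.length_dropWhile_le pvPos
          simp at hw
          omega
        have hrec := ih (u.dropWhile pvPos) hlen (i + ((x :: u.takeWhile pvPos).length : Int))
          (chalA i σ (x :: u.takeWhile pvPos)) (chalB b (x :: u.takeWhile pvPos))
          (pvDRef d (x :: u.takeWhile pvPos)) (by omega) hdrop' hInv'
        rw [pvRuns_cons_pos x u hx, List.foldl_cons, List.foldl_cons]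
        rw [show foldRunsA Arr i (x :: u) σ
            = foldRunsA Arr (i + 1 + ((u.takeWhile pvPos).length : Int)) (u.dropWhile pvPos)
              (chalA i σ (x :: u.takeWhile pvPos)) by rw [foldRunsA]; simp [hx]]
        have harg1 : i + 1 + ((u.takeWhile pvPos).length : Int)
            = i + ((x :: u.takeWhile pvPos).length : Int) := by
          simp
          ring
        have harg2 : i + ((x :: u).length : Int)
            = i + ((x :: u.takeWhile pvPos).length : Int) + ((u.dropWhile pvPos).length : Int) := by
          have hlen2 : (x :: u).length = (x :: u.takeWhile pvPos).length + (u.dropWhile pvPos).length := by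
            rw [hsplit, List.length_append]
          omega
        rw [harg1, harg2]
        exact hrec
      · rw [pvRuns_cons_neg x u hx]
        rw [show foldRunsA Arr i (x :: u) σ = foldRunsA Arr (i + 1) u σ by
          rw [foldRunsA]; simp [hx]]
        have hdrop' : Arr.drop (i + 1).toNat = u := by
          have h2 : (i + 1).toNat = i.toNat + 1 := by omega
          rw [h2, ← List.drop_drop, hdrop]
          rfl
        have hrec := ih u (by simp at hw; omega) (i + 1) σ b d (by omega) hdrop'
          (pvInv_mono Arr i (i + 1) σ b d (by omega) hInv)
        have harg : i + ((x :: u).length : Int) = i + 1 + (u.length : Int) := by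
          simp
          ring
        rw [harg]
        exact hrec

theorem main_inv (A : List Int) :
    pvInv A A.length
      ((PySem.List.pyRange 0 (A.length : Int) 1).foldl
        (fun σ i => if 0 ≤ PySem.List.pyGetD A i 0 then innerA A i σ (PySem.List.pyRange i (A.length : Int) 1) else σ)
        ⟨none, 0, -1, -1⟩)
      ((pvRuns A).foldl chalB ⟨[], none, 0⟩)
      ((pvRuns A).foldl pvDRef (none, 0, false)) := by
  have h0 : (0 : Int) ≤ 0 := le_rfl
  have hdrop0 : A.drop (0 : Int).toNat = A := by simp
  have h1 := outer_eq_outerSim A A 0 ⟨none, 0, -1, -1⟩ h0 hdrop0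
  have h2 := outerSim_eq_foldRunsA A A.length A le_rfl 0 ⟨none, 0, -1, -1⟩
    (fun _ => rfl) (fun M hM => by cases hM)
  have hInv0 : pvInv A 0 ⟨none, 0, -1, -1⟩ ⟨[], none, 0⟩ (none, 0, false) :=
    ⟨rfl, rfl, rfl, rfl, fun _ => ⟨rfl, rfl, rfl, rfl, rfl⟩, fun M hM => by cases hM⟩
  have h3 := fold_preserve A A.length A le_rfl 0 ⟨none, 0, -1, -1⟩ ⟨[], none, 0⟩
    (none, 0, false) h0 hdrop0 hInv0
  rw [h1, h2]
  simpa using h3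


-- ---- bridging the compact D_ fold (sign groups, Int sentinel) to the reference fold ----

def pvNeg (x : Int) : Bool := decide (x < 0)

theorem isChain_pos (v : List Int) (h : ∀ x ∈ v, 0 ≤ x) :
    List.IsChain (fun a b => (fun a b : Int => decide (0 ≤ a) == decide (0 ≤ b)) a b = true) v := by
  induction v with
  | nil => exact List.IsChain.nil
  | cons x u ih =>
    cases u with
    | nil => exact List.isChain_singleton x
    | cons y u' =>
      rw [List.isChain_cons_cons]
      refine ⟨?_, ih (fun z hz => h z (by simp [hz]))⟩
      have hx : 0 ≤ x := h x (by simp)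
      have hy : 0 ≤ y := h y (by simp)
      simp [hx, hy]

theorem isChain_neg (v : List Int) (h : ∀ x ∈ v, x < 0) :
    List.IsChain (fun a b => (fun a b : Int => decide (0 ≤ a) == decide (0 ≤ b)) a b = true) v := by
  induction v with
  | nil => exact List.IsChain.nil
  | cons x u ih =>
    cases u with
    | nil => exact List.isChain_singleton x
    | cons y u' =>
      rw [List.isChain_cons_cons]
      refine ⟨?_, ih (fun z hz => h z (by simp [hz]))⟩
      have hx : x < 0 := h x (by simp)
      have hy : y < 0 := h y (by simp)
      simp [hx, hy]
      omega

theorem dropWhile_blockN (u : List Int) :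
    u.dropWhile pvNeg = [] ∨ ∃ y u', u.dropWhile pvNeg = y :: u' ∧ 0 ≤ y := by
  induction u with
  | nil => left; rfl
  | cons x u ih =>
    by_cases hx : x < 0
    · simpa [List.dropWhile_cons, pvNeg, hx] using ih
    · right
      exact ⟨x, u, by simp [List.dropWhile_cons, pvNeg, hx], by omega⟩

theorem splitBy_sign_pos (x : Int) (u : List Int) (hx : 0 ≤ x) :
    List.splitBy (fun a b : Int => decide (0 ≤ a) == decide (0 ≤ b)) (x :: u)
      = (x :: u.takeWhile pvPos) :: List.splitBy (fun a b : Int => decide (0 ≤ a) == decide (0 ≤ b)) (u.dropWhile pvPos) := by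
  have hvpos : ∀ y ∈ x :: u.takeWhile pvPos, 0 ≤ y := by
    intro y hy
    rcases List.mem_cons.mp hy with rfl | hy'
    · exact hx
    · have := List.mem_takeWhile_imp hy'
      simpa [pvPos] using this
  have hne : (x :: u.takeWhile pvPos) ≠ [] := by simp
  have hchain := isChain_pos _ hvpos
  have hsplit : x :: u = (x :: u.takeWhile pvPos) ++ u.dropWhile pvPos := by
    simp [List.takeWhile_append_dropWhile]
  rcases dropWhile_block u with hw | ⟨y, w', hw, hy⟩
  · rw [hsplit, hw, List.append_nil, List.splitBy_of_isChain hne hchain, List.splitBy_nil]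
  · rw [hsplit, hw]
    rw [List.splitBy_append_cons w' ?hlast]
    · rw [List.splitBy_of_isChain hne hchain]
      rfl
    case hlast =>
      intro a ha
      have hmem : a ∈ x :: u.takeWhile pvPos := List.mem_of_getLast? ha
      have ha0 : 0 ≤ a := hvpos a hmem
      simp [ha0]
      omega

theorem splitBy_sign_neg (x : Int) (u : List Int) (hx : ¬ 0 ≤ x) :
    List.splitBy (fun a b : Int => decide (0 ≤ a) == decide (0 ≤ b)) (x :: u)
      = (x :: u.takeWhile pvNeg) :: List.splitBy (fun a b : Int => decide (0 ≤ a) == decide (0 ≤ b)) (u.dropWhile pvNeg) := by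
  have hvneg : ∀ y ∈ x :: u.takeWhile pvNeg, y < 0 := by
    intro y hy
    rcases List.mem_cons.mp hy with rfl | hy'
    · omega
    · have := List.mem_takeWhile_imp hy'
      simp [pvNeg] at this
      exact this
  have hne : (x :: u.takeWhile pvNeg) ≠ [] := by simp
  have hchain := isChain_neg _ hvneg
  have hsplit : x :: u = (x :: u.takeWhile pvNeg) ++ u.dropWhile pvNeg := by
    simp [List.takeWhile_append_dropWhile]
  rcases dropWhile_blockN u with hw | ⟨y, w', hw, hy⟩
  · rw [hsplit, hw, List.append_nil, List.splitBy_of_isChain hne hchain, List.splitBy_nil]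
  · rw [hsplit, hw]
    rw [List.splitBy_append_cons w' ?hlast]
    · rw [List.splitBy_of_isChain hne hchain]
      rfl
    case hlast =>
      intro a ha
      have hmem : a ∈ x :: u.takeWhile pvNeg := List.mem_of_getLast? ha
      have ha0 : a < 0 := hvneg a hmem
      simp [ha0]
      omega

theorem pvRuns_dropNeg (u : List Int) : pvRuns (u.dropWhile pvNeg) = pvRuns u := by
  induction u with
  | nil => rfl
  | cons x u ih =>
    by_cases hx : x < 0
    · rw [show (x :: u).dropWhile pvNeg = u.dropWhile pvNeg by simp [List.dropWhile_cons, pvNeg, hx]]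
      rw [ih, pvRuns_cons_neg x u (by omega)]
    · rw [show (x :: u).dropWhile pvNeg = x :: u by simp [List.dropWhile_cons, pvNeg, hx]]

theorem Dfold_eq : ∀ (n : ℕ) (u : List Int), u.length ≤ n →
    ∀ (m : Option Int) (l : Int) (dd : Bool) (st : Int × Int × Bool),
    (m = none → st = (-1, 0, dd) ∧ l = 0) →
    (∀ M, m = some M → 0 ≤ M ∧ st = (M, l, dd) ∧ 1 ≤ l) →
    ((List.splitBy (fun a b : Int => decide (0 ≤ a) == decide (0 ≤ b)) u).foldl pvDStep st).2.2
      = ((pvRuns u).foldl pvDRef (m, l, dd)).2.2 := by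
  intro n
  induction n with
  | zero =>
    intro u hu m l dd st hn hs
    have hu0 : u = [] := List.length_eq_zero_iff.mp (by omega)
    subst hu0
    cases m with
    | none => rw [(hn rfl).1]; simp [List.splitBy_nil, pvRuns, pvRunsGo]
    | some M => rw [(hs M rfl).2.1]; simp [List.splitBy_nil, pvRuns, pvRunsGo]
  | succ n ih =>
    intro u hu m l dd st hn hs
    cases u with
    | nil =>
      cases m with
      | none => rw [(hn rfl).1]; simp [List.splitBy_nil, pvRuns, pvRunsGo]
      | some M => rw [(hs M rfl).2.1]; simp [List.splitBy_nil, pvRuns, pvRunsGo]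
    | cons x u' =>
      by_cases hx : 0 ≤ x
      · -- a non-negative run v is processed by both folds
        set v := x :: u'.takeWhile pvPos with hv
        have hvpos : ∀ y ∈ v, 0 ≤ y := by
          intro y hy
          rcases List.mem_cons.mp hy with rfl | hy'
          · exact hx
          · have := List.mem_takeWhile_imp hy'
            simpa [pvPos] using this
        have hS0 : 0 ≤ v.sum := List.sum_nonneg hvpos
        have hL1 : (1 : Int) ≤ (v.length : Int) := by simp [hv]
        have hhead : v.headI = x := rfl
        have hlen : (u'.dropWhile pvPos).length ≤ n := by
          have := u'.length_dropWhile_le pvPos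
          simp at hu
          omega
        rw [splitBy_sign_pos x u' hx, pvRuns_cons_pos x u' hx, List.foldl_cons, List.foldl_cons]
        cases m with
        | none =>
          obtain ⟨hst, hl0⟩ := hn rfl
          subst hst hl0
          have hnew : pvDStep (-1, 0, dd) v = (v.sum, (v.length : Int), false) := by
            simp only [pvDStep]
            rw [if_neg (by rw [hhead]; omega)]
            have h1 : max (0 : Int) (v.length : Int) = (v.length : Int) := by omega
            have h2 : decide ((-1 : Int) < v.sum ∧ (v.length : Int) < 0) = false := by
              simp
            rw [h1, h2]
            simp
          have hold : pvDRef (none, 0, dd) v = (some v.sum, (v.length : Int), false) := by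
            simp only [pvDRef, gtM, eqM]
            rw [if_pos (by simp), if_pos (by omega)]
          rw [hnew, hold]
          exact ih (u'.dropWhile pvPos) hlen (some v.sum) (v.length : Int) false _
            (by intro h; cases h) (fun M hM => by
              simp only [Option.some.injEq] at hM
              exact ⟨by omega, by rw [hM], by omega⟩)
        | some M =>
          obtain ⟨hM0, hst, hl1⟩ := hs M rfl
          subst hst
          by_cases hc1 : v.sum < M
          · have hnew : pvDStep (M, l, dd) v = (M, l, dd) := by
              simp only [pvDStep]
              rw [if_pos (by right; left; exact hc1)]
            have hold : pvDRef (some M, l, dd) v = (some M, l, dd) := by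
              simp only [pvDRef, gtM, eqM]
              rw [if_neg (by simp; omega), if_neg (by simp; omega)]
            rw [hnew, hold]
            exact ih (u'.dropWhile pvPos) hlen (some M) l dd _
              (by intro h; cases h) (fun M' hM' => by
                simp only [Option.some.injEq] at hM'
                exact ⟨by omega, by rw [hM'], hl1⟩)
          · by_cases hc2 : l ≤ (v.length : Int)
            · have hnew : pvDStep (M, l, dd) v = (v.sum, (v.length : Int), false) := by
                simp only [pvDStep]
                rw [if_neg (by rw [hhead]; omega)]
                have h1 : max l (v.length : Int) = (v.length : Int) := by omega
                have h2 : decide (M < v.sum ∧ (v.length : Int) < l) = false := by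
                  simp
                  omega
                rw [h1, h2]
                simp
              have hold : pvDRef (some M, l, dd) v = (some v.sum, (v.length : Int), false) := by
                by_cases hgt : M < v.sum
                · simp only [pvDRef, gtM, eqM]
                  rw [if_pos (by simpa using hgt), if_pos (by omega)]
                · have hEq : v.sum = M := by omega
                  simp only [pvDRef, gtM, eqM]
                  rw [if_neg (by simp; omega), if_pos (by simp; omega)]
                  rw [hEq]
              rw [hnew, hold]
              exact ih (u'.dropWhile pvPos) hlen (some v.sum) (v.length : Int) false _
                (by intro h; cases h) (fun M' hM' => by
                  simp only [Option.some.injEq] at hM'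
                  exact ⟨by omega, by rw [hM'], by omega⟩)
            · by_cases hc3 : v.sum = M
              · have hnew : pvDStep (M, l, dd) v = (M, l, dd) := by
                  simp only [pvDStep]
                  rw [if_pos (by right; right; exact ⟨hc3, by omega⟩)]
                have hold : pvDRef (some M, l, dd) v = (some M, l, dd) := by
                  simp only [pvDRef, gtM, eqM]
                  rw [if_neg (by simp; omega), if_neg (by simp; omega)]
                rw [hnew, hold]
                exact ih (u'.dropWhile pvPos) hlen (some M) l dd _
                  (by intro h; cases h) (fun M' hM' => by
                    simp only [Option.some.injEq] at hM'
                    exact ⟨by omega, by rw [hM'], hl1⟩)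
              · have hgt : M < v.sum := by omega
                have hnew : pvDStep (M, l, dd) v = (v.sum, l, v.getLast? == some 0) := by
                  simp only [pvDStep]
                  rw [if_neg (by rw [hhead]; omega)]
                  have h1 : max l (v.length : Int) = l := by omega
                  have h2 : decide (M < v.sum ∧ (v.length : Int) < l) = true := by
                    simp
                    omega
                  rw [h1, h2]
                  simp
                have hold : pvDRef (some M, l, dd) v = (some v.sum, l, v.getLast? == some 0) := by
                  simp only [pvDRef, gtM, eqM]
                  rw [if_pos (by simpa using hgt), if_neg (by omega)]
                rw [hnew, hold]
                exact ih (u'.dropWhile pvPos) hlen (some v.sum) l (v.getLast? == some 0) _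
                  (by intro h; cases h) (fun M' hM' => by
                    simp only [Option.some.injEq] at hM'
                    exact ⟨by omega, by rw [hM'], hl1⟩)
      · -- a negative group is skipped by the splitBy fold and absent from pvRuns
        rw [splitBy_sign_neg x u' hx, List.foldl_cons]
        have hnew : pvDStep st (x :: u'.takeWhile pvNeg) = st := by
          simp only [pvDStep]
          rw [if_pos (by left; simp [List.headI_cons]; omega)]
        rw [hnew]
        have hlen : (u'.dropWhile pvNeg).length ≤ n := by
          have := u'.length_dropWhile_le pvNeg
          simp at hu
          omega
        have h1 := ih (u'.dropWhile pvNeg) hlen m l dd st hn hs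
        rw [h1, pvRuns_dropNeg, pvRuns_cons_neg x u' hx]

-- ===== VERDICT (by name: the statement is the Claim_ definition above) =====
theorem max_sum_pos_subarray_spec : Claim_unchanged_max_sum_pos_subarray := by
  intro A _
  intro hD
  have hInv := main_inv A
  have halt := alt_eq_runs A
  have hDD := Dfold_eq A.length A le_rfl none 0 false (-1, 0, false)
    (fun _ => ⟨rfl, rfl⟩) (fun M h => by cases h)
  have hdd : ((pvRuns A).foldl pvDRef (none, 0, false)).2.2 = false := by
    unfold D_max_sum_pos_subarray at hD
    rw [← hDD]
    exact Bool.eq_false_iff.mpr (fun h => hD h)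
  obtain ⟨hmb, hmd, hlb, hld, hnone, hsome⟩ := hInv
  simp only [max_sum_pos_subarray]
  cases hm : ((PySem.List.pyRange 0 (A.length : Int) 1).foldl
      (fun σ i => if 0 ≤ PySem.List.pyGetD A i 0 then innerA A i σ (PySem.List.pyRange i (A.length : Int) 1) else σ)
      ⟨none, 0, -1, -1⟩).m with
  | none =>
    obtain ⟨_, hs, he, hbr, _⟩ := hnone hm
    rw [if_pos ⟨hs, he⟩, halt, hbr]
  | some M =>
    obtain ⟨_, _, hs0, _, _, hwin, _⟩ := hsome M hm
    obtain ⟨hslice, _⟩ := hwin hdd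
    rw [if_neg (by intro h; omega), halt]
    exact hslice

theorem max_sum_pos_subarray_tight : Claim_exact_max_sum_pos_subarray := by
  intro A _ hD
  have hInv := main_inv A
  have halt := alt_eq_runs A
  have hDD := Dfold_eq A.length A le_rfl none 0 false (-1, 0, false)
    (fun _ => ⟨rfl, rfl⟩) (fun M h => by cases h)
  have hdd : ((pvRuns A).foldl pvDRef (none, 0, false)).2.2 = true := by
    rw [← hDD]
    exact hD
  obtain ⟨hmb, hmd, hlb, hld, hnone, hsome⟩ := hInv
  simp only [max_sum_pos_subarray]
  cases hm : ((PySem.List.pyRange 0 (A.length : Int) 1).foldl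
      (fun σ i => if 0 ≤ PySem.List.pyGetD A i 0 then innerA A i σ (PySem.List.pyRange i (A.length : Int) 1) else σ)
      ⟨none, 0, -1, -1⟩).m with
  | none =>
    obtain ⟨_, _, _, _, hdd0⟩ := hnone hm
    rw [hdd0] at hdd
    cases hdd
  | some M =>
    obtain ⟨_, _, hs0, _, _, _, hwint⟩ := hsome M hm
    obtain ⟨jn, hslice, hjn⟩ := hwint hdd
    rw [if_neg (by intro h; omega), halt, hslice]
    intro heq
    have := congrArg List.length heq
    rw [List.length_take] at this
    omega

theorem max_sum_pos_subarray_changed : Claim_changed_max_sum_pos_subarray := by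
  unfold Claim_changed_max_sum_pos_subarray; decide
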